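-- pv_equiv track=rewrite | github.com/shivaditya-meduri/adventOfCode | AOC24_day12.py | perimeter_ff
-- ===== SOURCE A (Python) =====
-- def perimeter_ff(h, w, boundary, d, visited=None, side=None):
--     if visited is None:
--         visited = set()
--     if side is None:
--         side = set()
--     if (h, w) in visited:
--         return side
--     visited.add((h, w))
--     side.add((h, w))
--     if d=='h':
--         if (h, w-1) in boundary:
--             side.update(perimeter_ff(h, w-1, boundary, d, visited, side))
--         if (h, w+1) in boundary:
--             side.update(perimeter_ff(h, w+1, boundary, d, visited, side))
--     elif d=='v':
--         if (h-1, w) in boundary: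
--             side.update(perimeter_ff(h-1, w, boundary, d, visited, side))
--         if (h+1, w) in boundary:
--             side.update(perimeter_ff(h+1, w, boundary, d, visited, side))
--     return side
-- ===== SOURCE B (Python) =====
-- def perimeter_ff(h, w, boundary, d, visited=None, side=None):
--     if visited is None:
--         visited = set()
--     if side is None:
--         side = set()
--     stack = [(h, w)]
--     while stack:
--         ch, cw = stack.pop()
--         if (ch, cw) in visited:
--             continue
--         visited.add((ch, cw))
--         side.add((ch, cw))
--         if d == 'h':
--             nbrs = ((ch, cw + 1), (ch, cw - 1))
--         elif d == 'v':
--             nbrs = ((ch + 1, cw), (ch - 1, cw))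
--         else:
--             nbrs = ()
--         for n in nbrs:
--             if n in boundary:
--                 stack.append(n)
--     return side
-- ===== Notes on version B (the rewrite author's own statement) =====
-- stated objective: alternative
-- what changed: The recursive DFS (one Python call frame per cell, threading visited/side through nested recursive calls) is replaced by an iterative flood fill with an explicit stack: pop a cell, skip it if visited, otherwise mark it and push its in-boundary axis neighbours; same sets are mutated and returned.
import Mathlib
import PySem

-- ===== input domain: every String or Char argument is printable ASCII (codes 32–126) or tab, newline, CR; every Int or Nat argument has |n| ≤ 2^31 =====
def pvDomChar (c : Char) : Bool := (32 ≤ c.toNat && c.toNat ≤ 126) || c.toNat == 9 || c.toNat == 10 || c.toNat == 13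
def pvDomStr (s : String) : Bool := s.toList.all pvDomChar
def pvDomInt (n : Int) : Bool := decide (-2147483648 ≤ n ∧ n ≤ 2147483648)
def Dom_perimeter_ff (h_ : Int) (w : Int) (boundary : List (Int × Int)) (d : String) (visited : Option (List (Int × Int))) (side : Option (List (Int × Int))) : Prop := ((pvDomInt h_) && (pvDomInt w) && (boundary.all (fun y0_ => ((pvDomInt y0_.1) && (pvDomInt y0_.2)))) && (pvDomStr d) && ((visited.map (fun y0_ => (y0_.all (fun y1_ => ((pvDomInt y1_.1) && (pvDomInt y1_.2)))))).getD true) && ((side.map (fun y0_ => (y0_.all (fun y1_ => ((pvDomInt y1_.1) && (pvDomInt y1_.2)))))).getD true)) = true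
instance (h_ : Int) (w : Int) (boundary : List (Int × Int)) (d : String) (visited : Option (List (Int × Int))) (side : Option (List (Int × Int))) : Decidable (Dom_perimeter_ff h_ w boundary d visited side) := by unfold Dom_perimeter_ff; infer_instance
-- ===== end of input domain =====

-- B replaces A's recursive axis flood fill by an iterative flood fill with an explicit stack (alternative decomposition, same cost).


-- ===== PORT A =====
-- A's recursion: visited and side are mutated sets threaded through the recursion; the pair (visited, side)
-- is the state.  The recursion is made total with fuel = boundary.length + 1: any call reached at fuel 0
-- necessarily has (h, w) ∈ visited (every recursive call adds a fresh boundary cell to visited first), so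
-- returning (visited, side) there is exactly what A's visited-check does — proved via ffA_bridge below.
def ffA (boundary : List (Int × Int)) (d : String) : Nat → Int → Int →
    PySem.Set (Int × Int) → PySem.Set (Int × Int) → PySem.Set (Int × Int) × PySem.Set (Int × Int)
  | 0, _, _, visited, side => (visited, side)
  | fuel + 1, h, w, visited, side =>
    if visited.contains (h, w) then (visited, side)
    else
      let v1 := PySem.Set.add visited (h, w)
      let s1 := PySem.Set.add side (h, w)
      if d == "h" then
        let p1 := if boundary.contains (h, w - 1) then ffA boundary d fuel h (w - 1) v1 s1 else (v1, s1)
        if boundary.contains (h, w + 1) then ffA boundary d fuel h (w + 1) p1.1 p1.2 else p1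
      else if d == "v" then
        let p1 := if boundary.contains (h - 1, w) then ffA boundary d fuel (h - 1) w v1 s1 else (v1, s1)
        if boundary.contains (h + 1, w) then ffA boundary d fuel (h + 1) w p1.1 p1.2 else p1
      else (v1, s1)

def perimeter_ff (h_ : Int) (w : Int) (boundary : List (Int × Int)) (d : String) (visited : Option (List (Int × Int))) (side : Option (List (Int × Int))) : List (Int × Int) :=
  (ffA boundary d (boundary.length + 1) h_ w (visited.getD PySem.Set.empty) (side.getD PySem.Set.empty)).2

-- ===== PORT B =====
-- Termination measure for the stack loop (helper for loopB's decreasing_by; cited by name there).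
def pvMeasureB (boundary : List (Int × Int)) (stack : List (Int × Int)) (v : PySem.Set (Int × Int)) : Nat :=
  2 * ((stack.toFinset ∪ boundary.toFinset).filter (fun x => x ∉ v)).card + stack.length

theorem pvMeasureB_skip {boundary : List (Int × Int)} {c : Int × Int} {rest : List (Int × Int)}
    {v : PySem.Set (Int × Int)} :
    pvMeasureB boundary rest v < pvMeasureB boundary (c :: rest) v := by
  unfold pvMeasureB
  have hsub : (rest.toFinset ∪ boundary.toFinset).filter (fun x => x ∉ v) ⊆
      ((c :: rest).toFinset ∪ boundary.toFinset).filter (fun x => x ∉ v) := by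
    apply Finset.filter_subset_filter
    intro x hx
    simp only [Finset.mem_union, List.mem_toFinset, List.mem_cons] at hx ⊢
    tauto
  have := Finset.card_le_card hsub
  simp only [List.length_cons]
  omega

theorem pvMeasureB_push {boundary : List (Int × Int)} {c : Int × Int} {rest ns : List (Int × Int)}
    {v : PySem.Set (Int × Int)} (hc : ¬ c ∈ v) (hns : ∀ x ∈ ns, x ∈ boundary) (hlen : ns.length ≤ 2) :
    pvMeasureB boundary (ns ++ rest) (v ++ [c]) < pvMeasureB boundary (c :: rest) v := by
  unfold pvMeasureB
  have hsub : ((ns ++ rest).toFinset ∪ boundary.toFinset).filter (fun x => x ∉ v ++ [c]) ⊆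
      (((c :: rest).toFinset ∪ boundary.toFinset).filter (fun x => x ∉ v)).erase c := by
    intro x hx
    simp only [Finset.mem_filter, Finset.mem_union, List.mem_toFinset, List.mem_append,
      List.mem_cons, Finset.mem_erase, not_or] at hx ⊢
    obtain ⟨hmem, hnv, hnc, -⟩ := hx
    refine ⟨hnc, ?_, hnv⟩
    rcases hmem with h | h
    · rcases h with h | h
      · exact Or.inr (hns x h)
      · exact Or.inl (Or.inr h)
    · exact Or.inr h
  have hcmem : c ∈ ((c :: rest).toFinset ∪ boundary.toFinset).filter (fun x => x ∉ v) := by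
    simp [hc]
  have h1 := Finset.card_le_card hsub
  have h2 := Finset.card_erase_of_mem hcmem
  have h3 : 0 < (((c :: rest).toFinset ∪ boundary.toFinset).filter (fun x => x ∉ v)).card :=
    Finset.card_pos.mpr ⟨c, hcmem⟩
  have h4 : (ns ++ rest).length = ns.length + rest.length := List.length_append
  simp only [List.length_cons]
  omega

-- B's loop: pop the head cell; skip if visited, else mark it and push the in-boundary axis neighbours
-- (Python pushes far-side first, so the head of the Lean stack is the near-side neighbour).
def loopB (boundary : List (Int × Int)) (d : String) :
    List (Int × Int) → PySem.Set (Int × Int) → PySem.Set (Int × Int) →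
    PySem.Set (Int × Int) × PySem.Set (Int × Int)
  | [], v, s => (v, s)
  | c :: rest, v, s =>
    if hv : v.contains c then loopB boundary d rest v s
    else
      let v1 := PySem.Set.add v c
      let s1 := PySem.Set.add s c
      let ns : List (Int × Int) :=
        (if d == "h" then [(c.1, c.2 - 1), (c.1, c.2 + 1)]
         else if d == "v" then [(c.1 - 1, c.2), (c.1 + 1, c.2)]
         else []).filter (fun p => boundary.contains p)
      loopB boundary d (ns ++ rest) v1 s1
  termination_by stack v s => pvMeasureB boundary stack v
  decreasing_by
  · exact pvMeasureB_skip
  · have hc : ¬ c ∈ v := by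
      intro hmem
      exact hv ((PySem.Set.contains_iff v c).mpr hmem)
    rw [PySem.Set.add_of_not_mem hc]
    refine pvMeasureB_push hc ?_ ?_
    · intro x hx
      have := (List.mem_filter.mp hx).2
      simpa [List.contains_iff_mem] using this
    · refine le_trans (List.length_filter_le _ _) ?_
      split <;> [skip; split] <;> simp

def perimeter_ff_alt (h_ : Int) (w : Int) (boundary : List (Int × Int)) (d : String) (visited : Option (List (Int × Int))) (side : Option (List (Int × Int))) : List (Int × Int) :=
  (loopB boundary d [(h_, w)] (visited.getD PySem.Set.empty) (side.getD PySem.Set.empty)).2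

-- ===== PRECONDITION & SPEC =====
def Spec_perimeter_ff (h_ : Int) (w : Int) (boundary : List (Int × Int)) (d : String) (visited : Option (List (Int × Int))) (side : Option (List (Int × Int))) (out : List (Int × Int)) : Prop := out = perimeter_ff_alt h_ w boundary d visited side
instance (h_ : Int) (w : Int) (boundary : List (Int × Int)) (d : String) (visited : Option (List (Int × Int))) (side : Option (List (Int × Int))) (out : List (Int × Int)) : Decidable (Spec_perimeter_ff h_ w boundary d visited side out) := by unfold Spec_perimeter_ff; infer_instance

-- ===== CLAIM (what is proved, stated in full; the proofs are below) =====
def Claim_equal_perimeter_ff : Prop := ∀ (h_ : Int) (w : Int) (boundary : List (Int × Int)) (d : String) (visited : Option (List (Int × Int))) (side : Option (List (Int × Int))), Dom_perimeter_ff h_ w boundary d visited side → Spec_perimeter_ff h_ w boundary d visited side (perimeter_ff h_ w boundary d visited side)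

-- ===== LEMMAS AND PROOFS =====

-- number of not-yet-visited cells reachable at all: fuel bound for ffA
def pvMu (boundary : List (Int × Int)) (c : Int × Int) (v : PySem.Set (Int × Int)) : Nat :=
  ((insert c boundary.toFinset).filter (fun x => x ∉ v)).card

theorem pvMu_mono {boundary : List (Int × Int)} {n : Int × Int} {v v' : PySem.Set (Int × Int)}
    (h : ∀ x ∈ v, x ∈ v') : pvMu boundary n v' ≤ pvMu boundary n v := by
  apply Finset.card_le_card
  intro x hx
  simp only [Finset.mem_filter] at hx ⊢
  exact ⟨hx.1, fun hm => hx.2 (h x hm)⟩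

theorem pvMu_lt {boundary : List (Int × Int)} {n c : Int × Int} {v : PySem.Set (Int × Int)}
    (hn : n ∈ boundary) (hc : ¬ c ∈ v) : pvMu boundary n (v ++ [c]) < pvMu boundary c v := by
  unfold pvMu
  have hsub : (insert n boundary.toFinset).filter (fun x => x ∉ v ++ [c]) ⊆
      ((insert c boundary.toFinset).filter (fun x => x ∉ v)).erase c := by
    intro x hx
    simp only [Finset.mem_filter, Finset.mem_insert, List.mem_toFinset, List.mem_append,
      List.mem_cons, not_or, Finset.mem_erase] at hx ⊢
    obtain ⟨hmem, hnv, hnc, -⟩ := hx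
    refine ⟨hnc, ?_, hnv⟩
    rcases hmem with h | h
    · exact Or.inr (h ▸ hn)
    · exact Or.inr h
  have hcmem : c ∈ (insert c boundary.toFinset).filter (fun x => x ∉ v) := by simp [hc]
  have h1 := Finset.card_le_card hsub
  have h2 := Finset.card_erase_of_mem hcmem
  have h3 : 0 < ((insert c boundary.toFinset).filter (fun x => x ∉ v)).card :=
    Finset.card_pos.mpr ⟨c, hcmem⟩
  omega

theorem pvMu_pos {boundary : List (Int × Int)} {c : Int × Int} {v : PySem.Set (Int × Int)}
    (hc : ¬ c ∈ v) : 1 ≤ pvMu boundary c v := by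
  unfold pvMu
  have hcmem : c ∈ (insert c boundary.toFinset).filter (fun x => x ∉ v) := by simp [hc]
  exact Finset.card_pos.mpr ⟨c, hcmem⟩

theorem ffA_mono {boundary : List (Int × Int)} {d : String} :
    ∀ (fuel : Nat) (h w : Int) (v s : PySem.Set (Int × Int)) (x : Int × Int),
    x ∈ v → x ∈ (ffA boundary d fuel h w v s).1 := by
  intro fuel
  induction fuel with
  | zero => intro h w v s x hx; simpa [ffA] using hx
  | succ f ih =>
    intro h w v s x hx
    have hadd : x ∈ PySem.Set.add v (h, w) := by
      rw [PySem.Set.add_eq_ite]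
      split <;> simp [hx]
    simp only [ffA]
    split_ifs <;>
      first
        | exact hx
        | exact hadd
        | exact ih _ _ _ _ _ hadd
        | exact ih _ _ _ _ _ (ih _ _ _ _ _ hadd)

theorem ffA_bridge {boundary : List (Int × Int)} {d : String} :
    ∀ (n : Nat) (c : Int × Int) (v s : PySem.Set (Int × Int)) (fuel : Nat) (rest : List (Int × Int)),
    pvMu boundary c v = n → pvMu boundary c v ≤ fuel →
    loopB boundary d (c :: rest) v s =
      loopB boundary d rest (ffA boundary d fuel c.1 c.2 v s).1 (ffA boundary d fuel c.1 c.2 v s).2 := by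
  intro n
  induction n using Nat.strong_induction_on with
  | _ n ih =>
    intro c v s fuel rest hmu hfuel
    by_cases hcv : c ∈ v
    · have hct : PySem.Set.contains v c = true := (PySem.Set.contains_iff v c).mpr hcv
      cases fuel with
      | zero => simp [ffA, loopB, hcv]
      | succ f => simp [ffA, loopB, hcv]
    · have hpos := pvMu_pos (boundary := boundary) hcv
      obtain ⟨f, rfl⟩ : ∃ f, fuel = f + 1 := ⟨fuel - 1, by omega⟩
      have hv1 : PySem.Set.add v c = v ++ [c] := PySem.Set.add_of_not_mem hcv
      have hb : ¬ (PySem.Set.contains v c = true) := by simpa using hcv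
      have hb2 : ¬ (PySem.Set.contains v (c.1, c.2) = true) := by rw [Prod.mk.eta]; exact hb
      have hself : ∀ x ∈ v ++ [c], x ∈ PySem.Set.add v c := by
        rw [hv1]; exact fun x h => h
      have step : ∀ (e : Int × Int), e ∈ boundary → ∀ (v' s' : PySem.Set (Int × Int)),
          (∀ x ∈ v ++ [c], x ∈ v') → ∀ (rest' : List (Int × Int)),
          loopB boundary d (e :: rest') v' s' =
            loopB boundary d rest' (ffA boundary d f e.1 e.2 v' s').1 (ffA boundary d f e.1 e.2 v' s').2 := by
        intro e he v' s' hsub rest'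
        have hlt : pvMu boundary e v' < n :=
          lt_of_le_of_lt (pvMu_mono hsub) (hmu ▸ pvMu_lt he hcv)
        exact ih _ hlt e v' s' f rest' rfl (by omega)
      rw [loopB, ffA, dif_neg hb, if_neg hb2]
      by_cases hd : (d == "h") = true
      · by_cases hl : boundary.contains (c.1, c.2 - 1) = true <;>
          by_cases hr : boundary.contains (c.1, c.2 + 1) = true
        · simp only [hd, hl, hr, Prod.mk.eta, List.filter_cons, List.filter_nil, if_true, List.cons_append, List.nil_append]
          rw [step _ (by simpa using hl) _ _ hself, step _ (by simpa using hr) _ _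
            (fun x hx => ffA_mono f _ _ _ _ x (hself x hx))]
        · simp only [hd, hl, hr, Prod.mk.eta, List.filter_cons, List.filter_nil, if_true, Bool.false_eq_true, if_false,
            List.cons_append, List.nil_append]
          rw [step _ (by simpa using hl) _ _ hself]
        · simp only [hd, hl, hr, Prod.mk.eta, List.filter_cons, List.filter_nil, if_true, Bool.false_eq_true, if_false,
            List.cons_append, List.nil_append]
          rw [step _ (by simpa using hr) _ _ hself]
        · simp only [hd, hl, hr, Prod.mk.eta, List.filter_cons, List.filter_nil, if_true, Bool.false_eq_true, if_false,
            List.nil_append]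
      · by_cases hdv : (d == "v") = true
        · by_cases hl : boundary.contains (c.1 - 1, c.2) = true <;>
            by_cases hr : boundary.contains (c.1 + 1, c.2) = true
          · simp only [hd, hdv, hl, hr, Prod.mk.eta, List.filter_cons, List.filter_nil, if_true, Bool.false_eq_true, if_false,
              List.cons_append, List.nil_append]
            rw [step _ (by simpa using hl) _ _ hself, step _ (by simpa using hr) _ _
              (fun x hx => ffA_mono f _ _ _ _ x (hself x hx))]
          · simp only [hd, hdv, hl, hr, Prod.mk.eta, List.filter_cons, List.filter_nil, if_true, Bool.false_eq_true, if_false,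
              List.cons_append, List.nil_append]
            rw [step _ (by simpa using hl) _ _ hself]
          · simp only [hd, hdv, hl, hr, Prod.mk.eta, List.filter_cons, List.filter_nil, if_true, Bool.false_eq_true, if_false,
              List.cons_append, List.nil_append]
            rw [step _ (by simpa using hr) _ _ hself]
          · simp only [hd, hdv, hl, hr, Prod.mk.eta, List.filter_cons, List.filter_nil, if_true, Bool.false_eq_true, if_false,
              List.nil_append]
        · simp only [hd, hdv, Prod.mk.eta, Bool.false_eq_true, if_false, List.filter_nil,
            List.nil_append]

-- ===== VERDICT (by name: the statement is the Claim_ definition above) =====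
theorem perimeter_ff_spec : Claim_equal_perimeter_ff := by
  intro h_ w boundary d visited side _
  unfold Spec_perimeter_ff perimeter_ff perimeter_ff_alt
  have hfuel : pvMu boundary (h_, w) (visited.getD PySem.Set.empty) ≤ boundary.length + 1 := by
    unfold pvMu
    have h1 := Finset.card_filter_le (insert (h_, w) boundary.toFinset)
      (fun x => x ∉ visited.getD PySem.Set.empty)
    have h2 := Finset.card_insert_le (h_, w) boundary.toFinset
    have h3 := List.toFinset_card_le boundary
    omega
  have h := ffA_bridge (boundary := boundary) (d := d)
    (pvMu boundary (h_, w) (visited.getD PySem.Set.empty)) (h_, w)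
    (visited.getD PySem.Set.empty) (side.getD PySem.Set.empty)
    (boundary.length + 1) [] rfl hfuel
  rw [h]
  simp only [loopB]
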